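-- pv_equiv track=rewrite | github.com/zantyru/wrk-Python121-exercises-02 | 2022_04_04/set0001_z01_v2.py | compute_loops_in_digit_glyphs
-- ===== SOURCE A (Python) =====
-- def compute_loops_in_digit_glyphs(n):
--     s = str(n)
--     result = 0
--     for digit in s:
--         if digit == "0" or digit == "6" or digit == "9":
--             result += 1
--         elif digit == "8":
--             result += 2
--     return result
-- ===== SOURCE B (Python) =====
-- def compute_loops_in_digit_glyphs(n):
--     m = abs(n)
--     if m == 0:
--         return 1
--     loops = {0: 1, 6: 1, 8: 2, 9: 1}
--     total = 0
--     while m: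
--         total += loops.get(m % 10, 0)
--         m //= 10
--     return total
-- ===== Notes on version B (the rewrite author's own statement) =====
-- stated objective: alternative
-- what changed: Replaces the string conversion and per-character branching loop by pure integer arithmetic: repeatedly extract the low decimal digit with % 10 and // 10 and sum per-digit loop counts from a lookup table, never building str(n).
import Mathlib
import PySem

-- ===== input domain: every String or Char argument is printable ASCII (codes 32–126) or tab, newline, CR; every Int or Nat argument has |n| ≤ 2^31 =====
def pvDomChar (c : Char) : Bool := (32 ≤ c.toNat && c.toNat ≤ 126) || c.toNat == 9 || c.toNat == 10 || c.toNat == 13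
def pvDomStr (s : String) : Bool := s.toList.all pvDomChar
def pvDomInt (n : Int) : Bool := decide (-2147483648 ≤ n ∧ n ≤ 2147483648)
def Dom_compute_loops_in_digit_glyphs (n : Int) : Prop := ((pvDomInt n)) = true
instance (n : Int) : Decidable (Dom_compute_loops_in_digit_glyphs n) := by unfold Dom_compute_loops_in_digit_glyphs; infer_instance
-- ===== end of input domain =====

-- B avoids the string conversion entirely: it extracts decimal digits of abs(n) with % 10 and // 10
-- and sums per-digit loop counts from a lookup table (objective: alternative).

-- ===== PORT A =====
-- s = str(n); for digit in s: if digit in "069": result += 1 elif digit == "8": result += 2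
def compute_loops_in_digit_glyphs (n : Int) : Int :=
  let s := PySem.Int.toChars n
  s.foldl (fun result digit =>
    if digit == '0' || digit == '6' || digit == '9' then result + 1
    else if digit == '8' then result + 2
    else result) 0

-- ===== PORT B =====
-- loops = {0: 1, 6: 1, 8: 2, 9: 1}
def pvLoops : PySem.Dict Int Int := PySem.Dict.ofList [(0, 1), (6, 1), (8, 2), (9, 1)]

-- while m: total += loops.get(m % 10, 0); m //= 10
-- m = abs(n) is a nonnegative Python int, so it is carried as a Nat; on nonnegative values
-- Nat's % and / are exactly Python's % and //, so the transliteration is exact.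
def pvBGo (m : Nat) (total : Int) : Int :=
  if h : m = 0 then total  -- h is the termination guard
  else pvBGo (m / 10) (total + pvLoops.getD ((m % 10 : Nat) : Int) 0)
  termination_by m
  decreasing_by exact Nat.div_lt_self (Nat.pos_of_ne_zero h) (by norm_num)

def compute_loops_in_digit_glyphs_alt (n : Int) : Int :=
  let m := n.natAbs
  if m = 0 then 1 else pvBGo m 0

-- ===== PRECONDITION & SPEC =====
def Spec_compute_loops_in_digit_glyphs (n : Int) (out : Int) : Prop := out = compute_loops_in_digit_glyphs_alt n
instance (n : Int) (out : Int) : Decidable (Spec_compute_loops_in_digit_glyphs n out) := by unfold Spec_compute_loops_in_digit_glyphs; infer_instance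

-- ===== CLAIM (what is proved, stated in full; the proofs are below) =====
def Claim_equal_compute_loops_in_digit_glyphs : Prop := ∀ (n : Int), Dom_compute_loops_in_digit_glyphs n → Spec_compute_loops_in_digit_glyphs n (compute_loops_in_digit_glyphs n)

-- ===== LEMMAS AND PROOFS =====

-- the per-character loop weight of A's branch structure
def pvW (d : Char) : Int :=
  if d == '0' || d == '6' || d == '9' then 1
  else if d == '8' then 2 else 0

-- digit-weight sum of the decimal representation of m (including m = 0 ↦ weight of '0')
def pvWsum (m : Nat) : Int :=
  pvW (Nat.digitChar (m % 10)) + (if h : m / 10 = 0 then 0 else pvWsum (m / 10))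
  termination_by m
  decreasing_by exact Nat.div_lt_self (Nat.pos_of_ne_zero (fun e => h (by simp [e]))) (by norm_num)

theorem pv_step_eq : (fun (result : Int) (digit : Char) =>
    if digit == '0' || digit == '6' || digit == '9' then result + 1
    else if digit == '8' then result + 2
    else result) = (fun result digit => result + pvW digit) := by
  funext r d
  simp only [pvW]
  split_ifs <;> simp

theorem pv_toDigitsCore_sum (f : Nat) : ∀ (m : Nat) (l : List Char), m < 10 ^ (f + 1) →
    ((Nat.toDigitsCore 10 (f + 1) m l).map pvW).sum = pvWsum m + (l.map pvW).sum := by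
  induction f with
  | zero =>
    intro m l h
    have h0 : m / 10 = 0 := Nat.div_eq_of_lt (by simpa using h)
    rw [Nat.toDigitsCore]
    simp only [h0, if_true, List.map_cons, List.sum_cons]
    rw [pvWsum]
    simp only [h0, dite_true]
    ring
  | succ f ih =>
    intro m l h
    rw [Nat.toDigitsCore]
    by_cases h0 : m / 10 = 0
    · simp only [h0, if_true, List.map_cons, List.sum_cons]
      rw [pvWsum]
      simp only [h0, dite_true]
      ring
    · simp only [h0, if_false]
      have hlt : m / 10 < 10 ^ (f + 1) := by
        rw [Nat.div_lt_iff_lt_mul (by norm_num)]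
        calc m < 10 ^ (f + 1 + 1) := h
          _ = 10 ^ (f + 1) * 10 := by ring
      rw [ih (m / 10) _ hlt]
      simp only [List.map_cons, List.sum_cons]
      conv_rhs => rw [pvWsum]
      rw [dif_neg h0]
      ring

theorem pv_w_digitChar (d : Nat) (hd : d < 10) :
    pvW (Nat.digitChar d) = pvLoops.getD (d : Int) 0 := by
  interval_cases d <;> decide

theorem pv_go_eq_wsum (m : Nat) (hm : m ≠ 0) : ∀ (acc : Int), pvBGo m acc = acc + pvWsum m := by
  induction m using Nat.strong_induction_on with
  | _ m ih =>
    intro acc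
    rw [pvBGo, dif_neg hm, pvWsum,
      pv_w_digitChar (m % 10) (Nat.mod_lt _ (by norm_num))]
    by_cases h0 : m / 10 = 0
    · rw [h0, pvBGo, dif_pos rfl]
      simp only [dite_true]
      ring
    · rw [ih (m / 10) (Nat.div_lt_self (Nat.pos_of_ne_zero hm) (by norm_num)) h0]
      simp only [h0, dite_false]
      ring

theorem pv_toDigits_sum (m : Nat) : ((Nat.toDigits 10 m).map pvW).sum = pvWsum m := by
  have h : m < 10 ^ (m + 1) := by
    calc m < m + 1 := Nat.lt_succ_self m
      _ ≤ 10 ^ (m + 1) := Nat.le_of_lt (Nat.lt_pow_self (by norm_num))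
  rw [Nat.toDigits, pv_toDigitsCore_sum m m [] h]
  simp

-- ===== VERDICT (by name: the statement is the Claim_ definition above) =====
theorem compute_loops_in_digit_glyphs_spec : Claim_equal_compute_loops_in_digit_glyphs := by
  intro n _
  show _ = _
  unfold compute_loops_in_digit_glyphs compute_loops_in_digit_glyphs_alt
  rw [pv_step_eq]
  simp only []
  rw [PySem.List.foldl_add]
  by_cases hz : n.natAbs = 0
  · have hn : n = 0 := by omega
    subst hn
    decide
  · rw [if_neg hz, pv_go_eq_wsum n.natAbs hz, ← pv_toDigits_sum n.natAbs]
    unfold PySem.Int.toChars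
    by_cases hneg : n < 0
    · rw [if_pos hneg]
      simp [pvW]
    · rw [if_neg hneg]
      have h2 : n.toNat = n.natAbs := by omega
      rw [h2]
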